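-- pv_equiv track=rewrite | github.com/MrBrantCode/unitest_baseline | mut_generate/mist_train_taco/taco_7104/solution.py | find_kth_lexicographical_substring
-- ===== SOURCE A (Python) =====
-- from heapq import heappop, heappush, heapify
--
-- def find_kth_lexicographical_substring(s: str, k: int) -> str:
--     n = len(s)
--     if k > n * (n + 1) / 2:
--         return 'No such line.'
--
--     ss = [(s[i], i) for i in range(n)]
--     heapify(ss)
--
--     while k > 0:
--         k -= 1
--         t = heappop(ss)
--         if k == 0:
--             return t[0]
--         elif t[1] < n - 1:
--             heappush(ss, (t[0] + s[t[1] + 1], t[1] + 1))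
--
--     return 'No such line.'
-- ===== SOURCE B (Python) =====
-- def find_kth_lexicographical_substring(s: str, k: int) -> str:
--     n = len(s)
--     if k < 1 or k > n * (n + 1) // 2:
--         return 'No such line.'
--     subs = sorted(s[i:j + 1] for i in range(n) for j in range(i, n))
--     return subs[k - 1]
-- ===== Notes on version B (the rewrite author's own statement) =====
-- stated objective: simpler
-- what changed: A lazily enumerates substrings in lexicographic order with a heap of (substring, end-index) tuples, popping k times; B simply generates all n(n+1)/2 substrings, sorts them once with the library sort, and indexes the (k-1)-th — plainer code, trading memory (it materializes every substring) for simplicity.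
import Mathlib
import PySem

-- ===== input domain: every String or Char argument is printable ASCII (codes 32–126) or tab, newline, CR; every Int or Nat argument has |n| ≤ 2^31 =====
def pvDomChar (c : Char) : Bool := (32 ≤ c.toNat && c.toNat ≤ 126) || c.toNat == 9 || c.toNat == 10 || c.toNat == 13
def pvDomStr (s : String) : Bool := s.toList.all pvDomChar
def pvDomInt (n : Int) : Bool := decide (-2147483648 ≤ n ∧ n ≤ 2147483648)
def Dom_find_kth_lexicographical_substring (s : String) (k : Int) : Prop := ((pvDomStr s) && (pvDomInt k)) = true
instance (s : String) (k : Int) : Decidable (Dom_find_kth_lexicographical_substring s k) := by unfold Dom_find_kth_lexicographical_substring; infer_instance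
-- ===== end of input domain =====

-- B replaces A's lazy heap enumeration of substrings by generate-all-substrings + one
-- library sort + direct indexing (objective: simpler; same exact results).

-- ===== PORT A =====
-- Python tuple comparison (str, int) < (str, int); Python's str `<` is `<` on List Char.
def pvLt (a b : List Char × Int) : Bool :=
  decide (a.1 < b.1) || (a.1 == b.1 && decide (a.2 < b.2))

-- semantics of heapq's heappop on the heap's multiset of entries: remove and return the
-- least entry (ties cannot matter: tied entries are identical pairs and behave identically)
def pvPopMin : List (List Char × Int) → Option ((List Char × Int) × List (List Char × Int))
  | [] => none
  | x :: xs =>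
    match pvPopMin xs with
    | none => some (x, xs)
    | some (m, r) => if pvLt m x then some (m, x :: r) else some (x, xs)

-- the `while k > 0` loop of A, fuel = current value of k (the `none` branch is
-- unreachable for k ≤ n(n+1)/2, kept only for totality; heappush appends to the multiset)
def pvHeapLoop (cs : List Char) (n : Nat) : Nat → List (List Char × Int) → List Char
  | 0, _ => "No such line.".toList
  | f+1, heap =>
    match pvPopMin heap with
    | none => "No such line.".toList
    | some (t, rest) =>
      if f = 0 then t.1
      else pvHeapLoop cs n f
        (if t.2 < (n : Int) - 1 then
          rest ++ [(t.1 ++ ((PySem.List.pyGet? cs (t.2 + 1)).elim [] (fun c => [c])), t.2 + 1)]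
        else rest)

-- `k > n*(n+1)/2` is Python float division; exact here: for n(n+1) ≤ 2^52 the float is
-- exact, and beyond that both the float and the exact comparison are false for |k| ≤ 2^31.
def find_kth_lexicographical_substring (s : String) (k : Int) : String :=
  if 2 * k > (s.toList.length : Int) * ((s.toList.length : Int) + 1) then "No such line."
  else
    String.ofList (pvHeapLoop s.toList s.toList.length k.toNat
      ((List.range s.toList.length).map
        (fun (i : Nat) => ((PySem.List.pyGet? s.toList (i : Int)).elim [] (fun c => [c]), (i : Int)))))

-- ===== PORT B =====
def find_kth_lexicographical_substring_alt (s : String) (k : Int) : String :=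
  if k < 1 ∨ k > PySem.Int.floordiv ((s.toList.length : Int) * ((s.toList.length : Int) + 1)) 2 then
    "No such line."
  else
    String.ofList ((PySem.List.pyGet?
      (PySem.List.sorted
        ((List.range s.toList.length).flatMap (fun (i : Nat) =>
          (List.range' i (s.toList.length - i)).map (fun (j : Nat) =>
            PySem.List.slice s.toList (some (i : Int)) (some ((j : Int) + 1)))))
        (fun x => x))
      (k - 1)).getD [])

-- ===== PRECONDITION & SPEC =====
def Spec_find_kth_lexicographical_substring (s : String) (k : Int) (out : String) : Prop := out = find_kth_lexicographical_substring_alt s k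
instance (s : String) (k : Int) (out : String) : Decidable (Spec_find_kth_lexicographical_substring s k out) := by unfold Spec_find_kth_lexicographical_substring; infer_instance

-- ===== CLAIM (what is proved, stated in full; the proofs are below) =====
def Claim_equal_find_kth_lexicographical_substring : Prop := ∀ (s : String) (k : Int), Dom_find_kth_lexicographical_substring s k → Spec_find_kth_lexicographical_substring s k (find_kth_lexicographical_substring s k)

-- ===== LEMMAS AND PROOFS =====

-- substring of cs starting at j, ending at i (inclusive)
def pvSub (cs : List Char) (j i : Nat) : List Char := (cs.drop j).take (i + 1 - j)

-- the heap entry for (start j, end i)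
def pvEnt (cs : List Char) (p : Nat × Nat) : List Char × Int := (pvSub cs p.1 p.2, (p.2 : Int))

-- all substrings still reachable from a list of (start, end) states
def pvStrs (cs : List Char) (S : List (Nat × Nat)) : List (List Char) :=
  S.flatMap (fun p => (List.range' p.2 (cs.length - p.2)).map (fun i => pvSub cs p.1 i))

def pvLtP (a b : List Char × Int) : Prop := a.1 < b.1 ∨ (a.1 = b.1 ∧ a.2 < b.2)

lemma pvLt_iff (a b : List Char × Int) : pvLt a b = true ↔ pvLtP a b := by
  simp [pvLt, pvLtP]

lemma pvLt_false_iff (a b : List Char × Int) : pvLt a b = false ↔ ¬ pvLtP a b := by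
  rw [← pvLt_iff]; cases h : pvLt a b <;> simp

lemma pvLtP_irrefl (a : List Char × Int) : ¬ pvLtP a a := by
  rintro (h | ⟨-, h⟩) <;> exact lt_irrefl _ h

lemma pvLtP_asymm {a b : List Char × Int} (h : pvLtP a b) : ¬ pvLtP b a := by
  rcases h with h | ⟨he, h⟩ <;> rintro (h' | ⟨he', h'⟩)
  · exact lt_asymm h h'
  · exact absurd he'.symm (ne_of_lt h)
  · exact absurd he (ne_of_gt h')
  · exact lt_asymm h h'

lemma pvLtP_shift {z m x : List Char × Int} (h1 : ¬ pvLtP z m) (h2 : pvLtP z x) : pvLtP m x := by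
  have hle : m.1 ≤ z.1 := not_lt.mp (fun h => h1 (Or.inl h))
  rcases h2 with h | ⟨he, h⟩
  · rcases lt_or_eq_of_le hle with hlt | heq
    · exact Or.inl (lt_trans hlt h)
    · exact Or.inl (by rw [heq]; exact h)
  · rcases lt_or_eq_of_le hle with hlt | heq
    · exact Or.inl (he ▸ hlt)
    · refine Or.inr ⟨heq.trans he, ?_⟩
      have h2' : m.2 ≤ z.2 := not_lt.mp (fun hh => h1 (Or.inr ⟨heq.symm, hh⟩))
      exact lt_of_le_of_lt h2' h

lemma pvPopMin_cons (x : List Char × Int) (xs : List (List Char × Int)) :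
    ∃ m l1 l2, pvPopMin (x :: xs) = some (m, l1 ++ l2) ∧ x :: xs = l1 ++ m :: l2 ∧
      ∀ z ∈ x :: xs, pvLt z m = false := by
  induction xs generalizing x with
  | nil =>
    refine ⟨x, [], [], rfl, rfl, ?_⟩
    intro z hz; simp only [List.mem_singleton] at hz; subst hz
    rw [pvLt_false_iff]; exact pvLtP_irrefl _
  | cons y ys ih =>
    obtain ⟨m, l1, l2, h1, h2, h3⟩ := ih y
    by_cases hc : pvLt m x = true
    · refine ⟨m, x :: l1, l2, ?_, by rw [List.cons_append, ← h2], ?_⟩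
      · rw [pvPopMin, h1]; simp [hc]
      · intro z hz
        rcases List.mem_cons.mp hz with rfl | hz
        · rw [pvLt_false_iff]; exact pvLtP_asymm ((pvLt_iff _ _).mp hc)
        · exact h3 z hz
    · refine ⟨x, [], y :: ys, ?_, rfl, ?_⟩
      · rw [pvPopMin, h1]; simp [hc]
      · intro z hz
        rcases List.mem_cons.mp hz with rfl | hz
        · rw [pvLt_false_iff]; exact pvLtP_irrefl z
        · rw [pvLt_false_iff]; intro hzx
          have h4 : ¬ pvLtP z m := (pvLt_false_iff _ _).mp (h3 z hz)
          have h5 : pvLtP m x := pvLtP_shift h4 hzx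
          exact (pvLt_false_iff _ _).mp (Bool.not_eq_true _ ▸ hc : pvLt m x = false) h5

lemma pvLex_append (l : List Char) (a : Char) (t : List Char) :
    List.Lex (· < ·) l (l ++ a :: t) := by
  induction l with
  | nil => exact List.Lex.nil
  | cons c cs ih => exact List.Lex.cons ih

lemma pvLe_of_prefix {l m : List Char} (h : l <+: m) : l ≤ m := by
  obtain ⟨t, rfl⟩ := h
  cases t with
  | nil => simp
  | cons a t => exact le_of_lt ((List.lt_iff_lex_lt _ _).mpr (pvLex_append l a t))

lemma pvSub_prefix (cs : List Char) (j : Nat) {i i' : Nat} (h : i ≤ i') :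
    pvSub cs j i <+: pvSub cs j i' := by
  unfold pvSub
  rw [show i + 1 - j = min (i + 1 - j) (i' + 1 - j) by omega, ← List.take_take]
  exact List.take_prefix _ _

lemma pvSub_succ (cs : List Char) {j i : Nat} (hj : j ≤ i + 1) :
    pvSub cs j (i + 1) = pvSub cs j i ++ (cs[i + 1]?).toList := by
  unfold pvSub
  rw [show i + 1 + 1 - j = (i + 1 - j) + 1 by omega, List.take_add_one, List.getElem?_drop,
    show j + (i + 1 - j) = i + 1 by omega]

lemma pvMin_strs (cs : List Char) (S : List (Nat × Nat)) (q : Nat × Nat)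
    (hmin : ∀ z ∈ S.map (pvEnt cs), pvLt z (pvEnt cs q) = false) :
    ∀ x ∈ pvStrs cs S, pvSub cs q.1 q.2 ≤ x := by
  intro x hx
  simp only [pvStrs, List.mem_flatMap, List.mem_map] at hx
  obtain ⟨p, hp, i', hi', rfl⟩ := hx
  have h1 : pvLt (pvEnt cs p) (pvEnt cs q) = false :=
    hmin _ (List.mem_map.mpr ⟨p, hp, rfl⟩)
  have h2 : ¬ pvLtP (pvEnt cs p) (pvEnt cs q) := (pvLt_false_iff _ _).mp h1
  have h3 : pvSub cs q.1 q.2 ≤ pvSub cs p.1 p.2 := by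
    by_contra hlt
    exact h2 (Or.inl (lt_of_not_ge hlt))
  have h4 : p.2 ≤ i' := (List.mem_range'_1.mp hi').1
  exact le_trans h3 (pvLe_of_prefix (pvSub_prefix cs p.1 h4))

-- the two elaborations of `sorted` (core list instances vs. the LinearOrder-derived ones)
-- name the same function: the LT instances are definitionally equal and Decidable is a subsingleton
lemma pvSortedLO (X : List (List Char)) :
    PySem.List.sorted X (fun x => x) =
      @PySem.List.sorted (List Char) (List Char)
        (@Preorder.toLT _ (@PartialOrder.toPreorder _ (@LinearOrder.toPartialOrder _ inferInstance)))
        (@LinearOrder.toDecidableLT _ inferInstance) X (fun x => x) false := by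
  congr 1

lemma pvSorted_min_cons {X Y : List (List Char)} {m : List Char}
    (hperm : X.Perm (m :: Y)) (hmin : ∀ x ∈ X, m ≤ x) :
    PySem.List.sorted X (fun x => x) = m :: PySem.List.sorted Y (fun x => x) := by
  have hp : (m :: PySem.List.sorted Y (fun x => x)).Perm X :=
    ((PySem.List.sorted_perm Y (fun x => x) false).cons m).trans hperm.symm
  have hpw : List.Pairwise (fun a b => a ≤ b) (m :: PySem.List.sorted Y (fun x => x)) := by
    rw [List.pairwise_cons]
    refine ⟨?_, ?_⟩
    · intro y hy
      have hy' : y ∈ Y := (PySem.List.mem_sorted Y (fun x => x) false y).mp hy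
      exact hmin y (hperm.mem_iff.mpr (List.mem_cons_of_mem m hy'))
    · rw [pvSortedLO Y]
      exact PySem.List.sorted_pairwise Y (fun x => x)
  rw [pvSortedLO X, pvSortedLO Y]
  apply PySem.List.sorted_id_eq_of_perm_of_pairwise
  · rw [← pvSortedLO Y]; exact hp
  · rw [← pvSortedLO Y]; exact hpw

lemma pvStrs_append (cs : List Char) (S1 S2 : List (Nat × Nat)) :
    pvStrs cs (S1 ++ S2) = pvStrs cs S1 ++ pvStrs cs S2 := by
  simp [pvStrs]

lemma pvStrs_single (cs : List Char) (p : Nat × Nat) (hp : p.2 < cs.length) :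
    pvStrs cs [p] = pvSub cs p.1 p.2 :: pvStrs cs [(p.1, p.2 + 1)] := by
  simp only [pvStrs, List.flatMap_cons, List.flatMap_nil, List.append_nil]
  rw [show cs.length - p.2 = (cs.length - (p.2 + 1)) + 1 by omega, List.range'_succ]
  simp

lemma pvPermAux {α : Type} (A1 C A2 : List α) (x : α) :
    (A1 ++ ((x :: C) ++ A2)).Perm (x :: ((A1 ++ A2) ++ C)) := by
  have h1 : A1 ++ ((x :: C) ++ A2) = A1 ++ x :: (C ++ A2) := by simp
  rw [h1, List.append_assoc]
  exact List.perm_middle.trans (List.Perm.cons x (List.Perm.append_left A1 List.perm_append_comm))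

lemma pvStrs_perm_step (cs : List Char) (S1 S2 : List (Nat × Nat)) (p : Nat × Nat)
    (hp : p.2 < cs.length) :
    (pvStrs cs (S1 ++ p :: S2)).Perm
      (pvSub cs p.1 p.2 :: pvStrs cs ((S1 ++ S2) ++ [(p.1, p.2 + 1)])) := by
  have h0 : S1 ++ p :: S2 = S1 ++ ([p] ++ S2) := rfl
  rw [h0, pvStrs_append, pvStrs_append, pvStrs_single cs p hp,
    pvStrs_append, pvStrs_append]
  exact pvPermAux _ _ _ _

lemma pvOption_elim_toList (o : Option Char) : o.elim [] (fun c => [c]) = o.toList := by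
  cases o <;> rfl

lemma pvPop_analysis (cs : List Char) (s0 : Nat × Nat) (S0 : List (Nat × Nat)) :
    ∃ S1 q S2, s0 :: S0 = S1 ++ q :: S2 ∧
      pvPopMin ((s0 :: S0).map (pvEnt cs)) =
        some (pvEnt cs q, (S1 ++ S2).map (pvEnt cs)) ∧
      ∀ z ∈ (s0 :: S0).map (pvEnt cs), pvLt z (pvEnt cs q) = false := by
  obtain ⟨m, l1, l2, h1, h2, h3⟩ := pvPopMin_cons (pvEnt cs s0) (S0.map (pvEnt cs))
  have h2' : (s0 :: S0).map (pvEnt cs) = l1 ++ m :: l2 := by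
    rw [List.map_cons]; exact h2
  obtain ⟨S1, SB, hS, hm1, hm2⟩ := List.map_eq_append_iff.mp h2'
  obtain ⟨q, S2, hB, hq, hT⟩ := List.map_eq_cons_iff.mp hm2
  refine ⟨S1, q, S2, by rw [hS, hB], ?_, ?_⟩
  · rw [List.map_cons, h1, List.map_append, ← hm1, ← hT, hq]
  · intro z hz
    rw [List.map_cons] at hz
    rw [hq]
    exact h3 z hz

lemma pvMainLoop (cs : List Char) : ∀ (f : Nat) (S : List (Nat × Nat)),
    (∀ p ∈ S, p.1 ≤ p.2 ∧ p.2 < cs.length) → f < (pvStrs cs S).length →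
    pvHeapLoop cs cs.length (f + 1) (S.map (pvEnt cs)) =
      ((PySem.List.sorted (pvStrs cs S) (fun x => x))[f]?).getD [] := by
  intro f
  induction f with
  | zero =>
    intro S hb hf
    rcases S with _ | ⟨s0, S0⟩
    · simp [pvStrs] at hf
    obtain ⟨S1, q, S2, hS, hpop, hmin⟩ := pvPop_analysis cs s0 S0
    have hqmem : q ∈ s0 :: S0 := by
      rw [hS]; exact List.mem_append_right _ (List.mem_cons_self)
    have hqb := hb q hqmem
    have hperm : (pvStrs cs (s0 :: S0)).Perm
        (pvSub cs q.1 q.2 :: pvStrs cs ((S1 ++ S2) ++ [(q.1, q.2 + 1)])) := by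
      rw [hS]; exact pvStrs_perm_step cs S1 S2 q hqb.2
    have hsorted := pvSorted_min_cons hperm (pvMin_strs cs (s0 :: S0) q hmin)
    rw [pvHeapLoop, hpop, hsorted]
    simp [pvEnt]
  | succ f' ih =>
    intro S hb hf
    rcases S with _ | ⟨s0, S0⟩
    · simp [pvStrs] at hf
    obtain ⟨S1, q, S2, hS, hpop, hmin⟩ := pvPop_analysis cs s0 S0
    have hqmem : q ∈ s0 :: S0 := by
      rw [hS]; exact List.mem_append_right _ (List.mem_cons_self)
    have hqb := hb q hqmem
    have hbs : ∀ p ∈ S1 ++ S2, p.1 ≤ p.2 ∧ p.2 < cs.length := by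
      intro p hp
      apply hb
      rw [hS]
      rcases List.mem_append.mp hp with h | h
      · exact List.mem_append_left _ h
      · exact List.mem_append_right _ (List.mem_cons_of_mem _ h)
    have hperm : (pvStrs cs (s0 :: S0)).Perm
        (pvSub cs q.1 q.2 :: pvStrs cs ((S1 ++ S2) ++ [(q.1, q.2 + 1)])) := by
      rw [hS]; exact pvStrs_perm_step cs S1 S2 q hqb.2
    have hsorted := pvSorted_min_cons hperm (pvMin_strs cs (s0 :: S0) q hmin)
    have hlen : (pvStrs cs (s0 :: S0)).length =
        (pvStrs cs ((S1 ++ S2) ++ [(q.1, q.2 + 1)])).length + 1 := by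
      rw [hperm.length_eq]; rfl
    rw [pvHeapLoop, hpop]
    have hne : ¬ (f' + 1 = 0) := Nat.succ_ne_zero f'
    by_cases hc : q.2 + 1 < cs.length
    · have hcond : (pvEnt cs q).2 < (cs.length : Int) - 1 := by
        show ((q.2 : Nat) : Int) < (cs.length : Int) - 1
        omega
      simp only [hne, if_false, hcond, if_true]
      have hpush : ((pvEnt cs q).1 ++ ((PySem.List.pyGet? cs ((pvEnt cs q).2 + 1)).elim [] (fun c => [c])),
          (pvEnt cs q).2 + 1) = pvEnt cs (q.1, q.2 + 1) := by
        show (pvSub cs q.1 q.2 ++ ((PySem.List.pyGet? cs (((q.2 : Nat) : Int) + 1)).elim [] (fun c => [c])),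
          ((q.2 : Nat) : Int) + 1) = _
        rw [show ((q.2 : Nat) : Int) + 1 = (((q.2 + 1 : Nat) : Nat) : Int) by push_cast; ring,
          PySem.List.pyGet?_natCast, pvOption_elim_toList,
          ← pvSub_succ cs (le_trans hqb.1 (Nat.le_succ q.2))]
        rfl
      rw [hpush, show (S1 ++ S2).map (pvEnt cs) ++ [pvEnt cs (q.1, q.2 + 1)] =
          ((S1 ++ S2) ++ [(q.1, q.2 + 1)]).map (pvEnt cs) by simp]
      have hbs' : ∀ p ∈ (S1 ++ S2) ++ [(q.1, q.2 + 1)], p.1 ≤ p.2 ∧ p.2 < cs.length := by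
        intro p hp
        rcases List.mem_append.mp hp with h | h
        · exact hbs p h
        · simp only [List.mem_singleton] at h
          subst h
          exact ⟨le_trans hqb.1 (Nat.le_succ q.2), hc⟩
      rw [ih _ hbs' (by omega), hsorted, List.getElem?_cons_succ]
    · have hcond : ¬ ((pvEnt cs q).2 < (cs.length : Int) - 1) := by
        show ¬ (((q.2 : Nat) : Int) < (cs.length : Int) - 1)
        omega
      simp only [hne, if_false, hcond]
      have hq1 : q.2 + 1 = cs.length := by omega
      have hnil : pvStrs cs [(q.1, q.2 + 1)] = [] := by
        simp [pvStrs, hq1]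
      have hS'' : pvStrs cs ((S1 ++ S2) ++ [(q.1, q.2 + 1)]) = pvStrs cs (S1 ++ S2) := by
        rw [pvStrs_append, hnil, List.append_nil]
      rw [hS''] at hsorted hlen
      rw [ih _ hbs (by omega), hsorted, List.getElem?_cons_succ]

lemma pvGauss (n : Nat) : (((List.range n).map (fun i => n - i)).sum) * 2 = n * (n + 1) := by
  induction n with
  | zero => rfl
  | succ n ih =>
    rw [List.range_succ_eq_map, List.map_cons, List.map_map, List.sum_cons]
    have h1 : ∀ i ∈ List.range n, ((fun i => n + 1 - i) ∘ Nat.succ) i = (fun i => n - i) i := by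
      intro i _; simp only [Function.comp_apply]; omega
    rw [List.map_congr_left h1, Nat.add_mul, ih]
    simp only [Nat.sub_zero]
    ring

-- ===== VERDICT (by name: the statement is the Claim_ definition above) =====
theorem find_kth_lexicographical_substring_spec : Claim_equal_find_kth_lexicographical_substring := by
  intro s k _
  show find_kth_lexicographical_substring s k = find_kth_lexicographical_substring_alt s k
  unfold find_kth_lexicographical_substring find_kth_lexicographical_substring_alt
  set cs := s.toList with hcs
  set n := cs.length with hn
  have hfd : PySem.Int.floordiv ((n : Int) * ((n : Int) + 1)) 2 * 2 = (n : Int) * ((n : Int) + 1) := by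
    rw [PySem.Int.floordiv_eq_ediv_of_pos (by norm_num)]
    exact Int.ediv_mul_cancel (Int.even_mul_succ_self (n : Int)).two_dvd
  by_cases hg : 2 * k > (n : Int) * ((n : Int) + 1)
  · rw [if_pos hg, if_pos (Or.inr (by rw [← hfd] at hg; omega))]
  · rw [if_neg hg]
    by_cases hk1 : k < 1
    · rw [if_pos (Or.inl hk1), show k.toNat = 0 from by omega]
      exact String.ofList_toList
    · have hk2 : ¬ (k < 1 ∨ k > PySem.Int.floordiv ((n : Int) * ((n : Int) + 1)) 2) := by
        rw [not_or]
        exact ⟨hk1, by rw [← hfd] at hg; omega⟩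
      rw [if_neg hk2]
      have hkt : k.toNat = (k.toNat - 1) + 1 := by omega
      set f := k.toNat - 1 with hfdef
      have hheap : (List.range n).map
            (fun (i : Nat) => ((PySem.List.pyGet? cs (i : Int)).elim [] (fun c => [c]), (i : Int))) =
          ((List.range n).map (fun i => (i, i))).map (pvEnt cs) := by
        rw [List.map_map]
        apply List.map_congr_left
        intro i hi
        have hi' : i < n := List.mem_range.mp hi
        show ((PySem.List.pyGet? cs (i : Int)).elim [] (fun c => [c]), (i : Int)) = pvEnt cs (i, i)
        rw [PySem.List.pyGet?_natCast, List.getElem?_eq_getElem hi']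
        show ([cs[i]], (i : Int)) = (pvSub cs i i, (i : Int))
        rw [pvSub, show i + 1 - i = 1 by omega, List.drop_eq_getElem_cons hi']
        rfl
      have hsubs : (List.range n).flatMap (fun (i : Nat) =>
            (List.range' i (n - i)).map (fun (j : Nat) =>
              PySem.List.slice cs (some (i : Int)) (some ((j : Int) + 1)))) =
          pvStrs cs ((List.range n).map (fun i => (i, i))) := by
        rw [pvStrs, List.flatMap_map, List.flatMap_def, List.flatMap_def]
        apply congrArg
        apply List.map_congr_left
        intro i hi
        dsimp only
        rw [← hn]
        apply List.map_congr_left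
        intro j hj
        rw [show ((j : Nat) : Int) + 1 = (((j + 1 : Nat) : Nat) : Int) by push_cast; ring,
          PySem.List.slice_natCast]
        rfl
      have hb0 : ∀ p ∈ (List.range n).map (fun i => (i, i)), p.1 ≤ p.2 ∧ p.2 < cs.length := by
        intro p hp
        obtain ⟨i, hi, rfl⟩ := List.mem_map.mp hp
        exact ⟨le_refl i, List.mem_range.mp hi⟩
      have hT : (pvStrs cs ((List.range n).map (fun i => (i, i)))).length * 2 = n * (n + 1) := by
        rw [pvStrs, List.flatMap_map, List.length_flatMap]
        rw [List.map_congr_left (g := fun i => n - i) (by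
          intro i hi
          simp only [List.length_map, List.length_range', ← hn])]
        exact pvGauss n
      have hlen : f < (pvStrs cs ((List.range n).map (fun i => (i, i)))).length := by
        have h1 : ((pvStrs cs ((List.range n).map (fun i => (i, i)))).length : Int) * 2 =
            (n : Int) * ((n : Int) + 1) := by exact_mod_cast hT
        have h2 : 2 * k ≤ ((pvStrs cs ((List.range n).map (fun i => (i, i)))).length : Int) * 2 := by
          rw [h1]; exact not_lt.mp hg
        omega
      have hmain := pvMainLoop cs f _ hb0 hlen
      rw [hheap, hkt, hmain, hsubs,
        show k - 1 = ((f : Nat) : Int) by omega, PySem.List.pyGet?_natCast]
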